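-- pv_equiv track=rewrite | github.com/jheym/135 | assignment01/by_age.py | by_age
-- ===== SOURCE A (Python) =====
-- def by_age(dict_in: dict[str, int], min_age: int, max_age: int):
--     """
--     Takes a dictionary with names as keys and ages as values and returns
--     a new dictionary with ages as keys and a concatenation of names for that age.
--     """
--
--     # def by_value(item):    # For sorting by value item in dict.items() (which is a list of tuples)
--     #     return item[1]
--
--     # Lambda can replace the above helper function since the function body is so short.
--     by_value = lambda item: item[1]
--
--     new_dict = {}
--     for key, value in sorted(dict_in.items(), key=by_value):
--         if min_age <= value <= max_age:
--             if value in new_dict: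
--                 new_dict[value] = str(new_dict.get(value)) + " and " + str(key)
--                 continue
--             new_dict[value] = key
--     return new_dict
-- ===== SOURCE B (Python) =====
-- def by_age(dict_in: dict[str, int], min_age: int, max_age: int):
--     groups = {}
--     for name, age in dict_in.items():
--         if min_age <= age <= max_age:
--             groups.setdefault(age, []).append(name)
--     return {age: " and ".join(groups[age]) for age in sorted(groups)}
-- ===== Notes on version B (the rewrite author's own statement) =====
-- stated objective: simpler
-- what changed: Replaces A's stable sort of all items followed by a concatenating dict fold with a single grouping pass in original insertion order plus a join over the sorted distinct ages.
import Mathlib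
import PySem

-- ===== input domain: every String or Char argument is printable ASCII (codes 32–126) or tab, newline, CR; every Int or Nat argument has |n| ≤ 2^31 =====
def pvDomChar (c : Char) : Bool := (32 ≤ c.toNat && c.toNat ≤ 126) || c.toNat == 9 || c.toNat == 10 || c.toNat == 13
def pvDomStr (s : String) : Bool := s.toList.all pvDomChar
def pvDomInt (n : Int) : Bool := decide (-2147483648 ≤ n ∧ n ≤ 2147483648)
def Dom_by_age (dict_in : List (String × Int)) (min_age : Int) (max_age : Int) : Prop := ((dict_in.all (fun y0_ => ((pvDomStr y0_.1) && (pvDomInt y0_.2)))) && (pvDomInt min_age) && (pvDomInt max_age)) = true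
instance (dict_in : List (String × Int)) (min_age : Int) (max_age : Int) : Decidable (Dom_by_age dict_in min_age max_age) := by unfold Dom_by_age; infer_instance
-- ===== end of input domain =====

-- B replaces A's stable-sort-then-concatenating-dict-fold by one grouping pass in the
-- original insertion order followed by a join over the sorted ages (objective: simpler).

-- ===== PORT A =====
-- literal port of Source A: sort the items by value (Python's stable sort), then fold them
-- into an insertion-ordered dict, concatenating " and " onto an existing entry.
def by_age (dict_in : List (String × Int)) (min_age : Int) (max_age : Int) : List (Int × String) :=
  ((PySem.List.sorted dict_in (fun item => item.2)).foldl
    (fun (new_dict : PySem.Dict Int String) kv =>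
      if min_age ≤ kv.2 ∧ kv.2 ≤ max_age then
        (if new_dict.contains kv.2 then
          -- str(new_dict.get(value)) + " and " + str(key); both operands are strings already
          new_dict.insert kv.2 ((new_dict.getD kv.2 "None") ++ " and " ++ kv.1)
        else
          new_dict.insert kv.2 kv.1)
      else new_dict) PySem.Dict.empty).items

-- ===== PORT B =====
-- literal port of Source B: group names by age in insertion order (setdefault/append =
-- Dict.modify), then build the result over the sorted ages, joining with " and ".
def by_age_alt (dict_in : List (String × Int)) (min_age : Int) (max_age : Int) : List (Int × String) :=
  let groups : PySem.Dict Int (List String) :=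
    dict_in.foldl (fun g kv =>
      if min_age ≤ kv.2 ∧ kv.2 ≤ max_age then
        g.modify kv.2 [] (fun l => l ++ [kv.1])
      else g) PySem.Dict.empty
  ((PySem.List.sorted groups.keys (fun v => v)).foldl
    (fun (res : PySem.Dict Int String) v =>
      res.insert v (PySem.Str.join " and " (groups.getD v []))) PySem.Dict.empty).items

-- ===== PRECONDITION & SPEC =====
def Spec_by_age (dict_in : List (String × Int)) (min_age : Int) (max_age : Int) (out : List (Int × String)) : Prop := out = by_age_alt dict_in min_age max_age
instance (dict_in : List (String × Int)) (min_age : Int) (max_age : Int) (out : List (Int × String)) : Decidable (Spec_by_age dict_in min_age max_age out) := by unfold Spec_by_age; infer_instance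

-- ===== CLAIM (what is proved, stated in full; the proofs are below) =====
def Claim_equal_by_age : Prop := ∀ (dict_in : List (String × Int)) (min_age : Int) (max_age : Int), Dom_by_age dict_in min_age max_age → Spec_by_age dict_in min_age max_age (by_age dict_in min_age max_age)

-- ===== LEMMAS AND PROOFS =====

-- the range test as a Bool predicate
def pvKeep (lo hi : Int) (kv : String × Int) : Bool := decide (lo ≤ kv.2 ∧ kv.2 ≤ hi)
-- names carried by entries of age v, in list order
def pvNames (v : Int) (l : List (String × Int)) : List String :=
  (l.filter (fun kv => kv.2 == v)).map Prod.fst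
-- grouping of a list: distinct kept ages in first-occurrence order, each with G of its names
def pvGrp {ν : Type} (G : List String → ν) (lo hi : Int) (l : List (String × Int)) : List (Int × ν) :=
  (PySem.Set.ofList ((l.filter (pvKeep lo hi)).map Prod.snd)).map
    (fun v => (v, G (pvNames v (l.filter (pvKeep lo hi)))))
-- canonical result both programs compute
def pvCanon (lo hi : Int) (xs : List (String × Int)) : List (Int × String) :=
  (PySem.List.sorted (PySem.Set.ofList ((xs.filter (pvKeep lo hi)).map Prod.snd)) (fun v => v)).map
    (fun v => (v, PySem.Str.join " and " (pvNames v (xs.filter (pvKeep lo hi)))))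

theorem pv_find?_map {ν : Type} (A : List Int) (val : Int → ν) (v : Int) (h : v ∈ A) :
    (A.map (fun u => (u, val u))).find? (fun p => p.1 == v) = some (v, val v) := by
  induction A with
  | nil => cases h
  | cons a A ih =>
    by_cases hv : a = v
    · subst hv; simp
    · rw [List.map_cons, List.find?_cons_of_neg (by simpa using hv)]
      exact ih ((List.mem_cons.1 h).resolve_left fun he => hv he.symm)

theorem pv_get?_map {ν : Type} (d : PySem.Dict Int ν) (A : List Int) (val : Int → ν) (v : Int)
    (hd : d.items = A.map (fun u => (u, val u))) (h : v ∈ A) : d.get? v = some (val v) := by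
  simp [PySem.Dict.get?, hd, pv_find?_map A val v h]

theorem pv_contains_map {ν : Type} (d : PySem.Dict Int ν) (A : List Int) (val : Int → ν) (v : Int)
    (hd : d.items = A.map (fun u => (u, val u))) : d.contains v = decide (v ∈ A) := by
  simp only [PySem.Dict.contains, hd, List.any_map, Function.comp_def]
  rw [Bool.eq_iff_iff]
  simp [List.any_eq_true]

theorem pv_getD_not_contains {κ ν : Type} [BEq κ] (d : PySem.Dict κ ν) (k : κ) (dflt : ν)
    (h : d.contains k = false) : d.getD k dflt = dflt := by
  unfold PySem.Dict.getD PySem.Dict.get?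
  rw [List.find?_eq_none.2]
  · rfl
  · intro p hp
    unfold PySem.Dict.contains at h
    rw [List.any_eq_false] at h
    exact h p hp

theorem pvNames_append (u : Int) (l : List (String × Int)) (x : String × Int) :
    pvNames u (l ++ [x]) = pvNames u l ++ (if x.2 = u then [x.1] else []) := by
  by_cases h : x.2 = u <;> simp [pvNames, List.filter_append, h]

theorem pvNames_ne_nil (v : Int) (l : List (String × Int)) (h : v ∈ l.map Prod.snd) :
    pvNames v l ≠ [] := by
  rcases List.mem_map.1 h with ⟨kv, hm, he⟩
  have : kv.1 ∈ pvNames v l := by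
    exact List.mem_map.2 ⟨kv, List.mem_filter.2 ⟨hm, by simp [he]⟩, rfl⟩
  exact List.ne_nil_of_mem this

-- the shared loop shape: both A's dict fold and B's grouping fold produce the grouping
theorem pv_fold_group {ν : Type} (lo hi : Int) (merge : ν → String → ν) (ini : String → ν)
    (dflt : ν) (G : List String → ν) (hG1 : ∀ k, G [k] = ini k)
    (hG2 : ∀ ns k, ns ≠ [] → G (ns ++ [k]) = merge (G ns) k) (L : List (String × Int)) :
    (L.foldl (fun d kv => if lo ≤ kv.2 ∧ kv.2 ≤ hi then
        (if d.contains kv.2 then d.insert kv.2 (merge (d.getD kv.2 dflt) kv.1)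
         else d.insert kv.2 (ini kv.1)) else d) PySem.Dict.empty).items
      = pvGrp G lo hi L := by
  induction L using List.reverseRecOn with
  | nil => rfl
  | append_singleton L x ih =>
    rw [List.foldl_append, List.foldl_cons, List.foldl_nil]
    set d := L.foldl (fun d kv => if lo ≤ kv.2 ∧ kv.2 ≤ hi then
        (if d.contains kv.2 then d.insert kv.2 (merge (d.getD kv.2 dflt) kv.1)
         else d.insert kv.2 (ini kv.1)) else d) PySem.Dict.empty with hdd
    by_cases hx : lo ≤ x.2 ∧ x.2 ≤ hi
    · rw [if_pos hx]
      have hkx : pvKeep lo hi x = true := by simp [pvKeep, hx]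
      have hfil : (L ++ [x]).filter (pvKeep lo hi) = L.filter (pvKeep lo hi) ++ [x] := by
        simp [List.filter_append, hkx]
      set FL := L.filter (pvKeep lo hi) with hFL
      set A := PySem.Set.ofList (FL.map Prod.snd) with hA
      have hitems : d.items = A.map (fun u => (u, G (pvNames u FL))) := ih
      have hsets : PySem.Set.ofList ((FL ++ [x]).map Prod.snd) = A.add x.2 := by
        rw [List.map_append, List.map_cons, List.map_nil, PySem.Set.ofList_append_singleton]
      by_cases hv : x.2 ∈ A
      · -- the age already has an entry: insert overwrites it in place
        have hc : d.contains x.2 = true := by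
          rw [pv_contains_map d A _ x.2 hitems]; simpa using hv
        have hg : d.getD x.2 dflt = G (pvNames x.2 FL) := by
          unfold PySem.Dict.getD
          rw [pv_get?_map d A _ x.2 hitems hv]; rfl
        rw [hc, if_pos rfl, hg]
        show (PySem.Dict.insert d x.2 _).items = _
        unfold PySem.Dict.insert
        rw [hc, if_pos rfl]
        unfold pvGrp
        rw [hfil, hsets, PySem.Set.add_eq_ite, if_pos hv, hitems, List.map_map]
        apply List.map_congr_left
        intro u hu
        by_cases huv : u = x.2
        · subst huv
          have hvk : x.2 ∈ FL.map Prod.snd := by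
            rw [hA] at hv; exact (PySem.Set.mem_ofList _ _).1 hv
          have hne : pvNames x.2 FL ≠ [] := pvNames_ne_nil x.2 FL hvk
          simp only [Function.comp_def, beq_self_eq_true, if_pos]
          rw [pvNames_append, if_pos rfl, hG2 _ _ hne]
        · have : (u == x.2) = false := by simpa using huv
          simp only [Function.comp_def, this, Bool.false_eq_true, if_false]
          rw [pvNames_append, if_neg (fun he => huv he.symm), List.append_nil]
      · -- a new age: insert appends at the end
        have hc : d.contains x.2 = false := by
          rw [pv_contains_map d A _ x.2 hitems]; simpa using hv
        rw [hc, if_neg (by simp)]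
        show (PySem.Dict.insert d x.2 _).items = _
        unfold PySem.Dict.insert
        rw [hc, if_neg (by simp)]
        unfold pvGrp
        rw [hfil, hsets, PySem.Set.add_eq_ite, if_neg hv, hitems]
        rw [List.map_append, List.map_cons, List.map_nil]
        have hmap : List.map (fun u => (u, G (pvNames u FL))) A
            = List.map (fun v => (v, G (pvNames v (FL ++ [x])))) A := by
          apply List.map_congr_left
          intro u hu
          have huv : u ≠ x.2 := fun he => hv (he ▸ hu)
          rw [pvNames_append, if_neg (fun he => huv he.symm), List.append_nil]
        have hlast : (x.2, ini x.1) = (x.2, G (pvNames x.2 (FL ++ [x]))) := by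
          have hnames : pvNames x.2 FL = [] := by
            rcases he : pvNames x.2 FL with _ | ⟨n, ns⟩
            · rfl
            · exfalso
              have hm : n ∈ pvNames x.2 FL := by rw [he]; exact List.mem_cons_self
              rcases List.mem_map.1 hm with ⟨kv, hkv, hn⟩
              have : kv.2 = x.2 := by simpa using (List.mem_filter.1 hkv).2
              exact hv (hA ▸ (PySem.Set.mem_ofList _ _).2
                (List.mem_map.2 ⟨kv, (List.mem_filter.1 hkv).1, this⟩))
          rw [pvNames_append, if_pos rfl, hnames, List.nil_append, hG1]
        rw [hmap, hlast]
    · rw [if_neg hx, ih]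
      have hkx : pvKeep lo hi x = false := by simp [pvKeep, hx]
      unfold pvGrp
      rw [List.filter_append, List.filter_cons, hkx]
      simp

-- list-level join lemmas
theorem pv_inter_cons2 (s a c : List Char) (L : List (List Char)) :
    s.intercalate (a :: c :: L) = a ++ s ++ s.intercalate (c :: L) := by
  simp only [List.intercalate, List.intersperse_cons₂, List.flatten_cons]
  simp [List.append_assoc]

theorem pv_intercalate_append (s b a : List Char) (L : List (List Char)) :
    s.intercalate ((a :: L) ++ [b]) = s.intercalate (a :: L) ++ s ++ b := by
  induction L generalizing a with
  | nil => simp [List.intercalate]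
  | cons c L ih =>
    have ihc := ih c
    simp only [List.cons_append] at ihc ⊢
    rw [pv_inter_cons2, pv_inter_cons2, ihc]
    simp [List.append_assoc]

theorem pv_join_singleton (k : String) : PySem.Str.join " and " [k] = k := by
  rw [← String.toList_inj]
  simp [PySem.Str.join, PySem.Chars.join, List.intercalate]

theorem pv_join_append (ns : List String) (k : String) (h : ns ≠ []) :
    PySem.Str.join " and " (ns ++ [k]) = PySem.Str.join " and " ns ++ " and " ++ k := by
  rcases ns with _ | ⟨a, ns⟩
  · exact absurd rfl h
  · rw [← String.toList_inj]
    simp only [PySem.Str.join, PySem.Chars.join, String.toList_ofList, String.toList_append,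
      List.map_append, List.map_cons, List.map_nil, List.cons_append]
    rw [← List.cons_append, pv_intercalate_append]

-- A's result is the grouping of the sorted list
theorem by_age_eq_grp (xs : List (String × Int)) (lo hi : Int) :
    by_age xs lo hi
      = pvGrp (PySem.Str.join " and ") lo hi (PySem.List.sorted xs (fun item => item.2)) := by
  exact pv_fold_group lo hi (fun s k => s ++ " and " ++ k) (fun k => k) "None"
    (PySem.Str.join " and ") pv_join_singleton pv_join_append _

-- filtering a key-constant predicate through the stable sort gives the original filter
theorem pv_filter_insertBy (v : Int) (q : (String × Int) → Bool)
    (hq : ∀ kv, q kv = true → kv.2 = v) (x : String × Int) (ys : List (String × Int))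
    (hys : List.Pairwise (fun a b => a.2 ≤ b.2) ys) :
    (PySem.List.insertBy (fun a b => decide (a.2 < b.2)) x ys).filter q
      = if q x then ys.filter q ++ [x] else ys.filter q := by
  induction ys with
  | nil => by_cases h : q x <;> simp [PySem.List.insertBy, h]
  | cons y ys ih =>
    unfold PySem.List.insertBy
    by_cases hlt : x.2 < y.2
    · rw [if_pos (by simpa using hlt)]
      by_cases hqx : q x
      · have hxv : x.2 = v := hq x hqx
        have hfil : List.filter q (y :: ys) = [] := by
          rw [List.filter_eq_nil_iff]
          intro z hz hqz
          have hzv : z.2 = v := hq z hqz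
          have hyz : y.2 ≤ z.2 := by
            rcases List.mem_cons.1 hz with he | hz'
            · subst he; exact le_refl _
            · exact (List.pairwise_cons.1 hys).1 z hz'
          omega
        rw [if_pos hqx, hfil, List.filter_cons, if_pos hqx, hfil, List.nil_append]
      · rw [if_neg hqx, List.filter_cons, if_neg hqx]
    · rw [if_neg (by simpa using hlt)]
      have ih' := ih (List.pairwise_cons.1 hys).2
      rw [List.filter_cons, List.filter_cons, ih']
      by_cases hqx : q x <;> by_cases hqy : q y <;> simp [hqx, hqy]

theorem pv_filter_sorted (xs : List (String × Int)) (v : Int) (q : (String × Int) → Bool)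
    (hq : ∀ kv, q kv = true → kv.2 = v) :
    (PySem.List.sorted xs (fun kv => kv.2)).filter q = xs.filter q := by
  induction xs using List.reverseRecOn with
  | nil => rfl
  | append_singleton xs x ih =>
    rw [PySem.List.sorted_eq_foldl_insertBy] at ih ⊢
    rw [List.foldl_append, List.foldl_cons, List.foldl_nil]
    rw [pv_filter_insertBy v q hq x _ (by
      rw [← PySem.List.sorted_eq_foldl_insertBy]
      exact PySem.List.sorted_pairwise xs (fun kv => kv.2))]
    rw [ih, List.filter_append, List.filter_cons, List.filter_nil]
    by_cases hqx : q x <;> simp [hqx]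

theorem pvNames_sorted (xs : List (String × Int)) (lo hi : Int) (v : Int) :
    pvNames v ((PySem.List.sorted xs (fun kv => kv.2)).filter (pvKeep lo hi))
      = pvNames v (xs.filter (pvKeep lo hi)) := by
  unfold pvNames
  rw [List.filter_filter, List.filter_filter,
    pv_filter_sorted xs v _ (fun kv h => by
      simp only [Bool.and_eq_true, beq_iff_eq] at h
      first | exact h.2 | exact h.1)]

-- first occurrences of a ≤-sorted key list are <-sorted
theorem pv_ofList_pairwise_lt (ks : List Int) (h : List.Pairwise (· ≤ ·) ks) :
    List.Pairwise (· < ·) (PySem.Set.ofList ks) := by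
  induction ks using List.reverseRecOn with
  | nil => exact List.Pairwise.nil
  | append_singleton ks k ih =>
    rw [PySem.Set.ofList_append_singleton, PySem.Set.add_eq_ite]
    rcases List.pairwise_append.1 h with ⟨h1, _, h3⟩
    by_cases hk : k ∈ PySem.Set.ofList ks
    · rw [if_pos hk]; exact ih h1
    · rw [if_neg hk]
      refine List.pairwise_append.2 ⟨ih h1, List.pairwise_singleton _ _, ?_⟩
      intro a ha b hb
      rw [List.mem_singleton] at hb; subst hb
      have hale : a ≤ b := h3 a ((PySem.Set.mem_ofList ks a).1 ha) b List.mem_cons_self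
      have : a ≠ b := fun he => hk (he ▸ ha)
      omega

theorem pv_keyset (xs : List (String × Int)) (lo hi : Int) :
    PySem.List.sorted (PySem.Set.ofList ((xs.filter (pvKeep lo hi)).map Prod.snd)) (fun v => v)
      = PySem.Set.ofList (((PySem.List.sorted xs (fun kv => kv.2)).filter (pvKeep lo hi)).map Prod.snd) := by
  apply PySem.List.sorted_eq_of_perm_of_pairwise_lt
  · rw [List.perm_ext_iff_of_nodup (PySem.Set.nodup_ofList _) (PySem.Set.nodup_ofList _)]
    intro a
    simp only [PySem.Set.mem_ofList, List.mem_map, List.mem_filter, PySem.List.mem_sorted]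
  · exact pv_ofList_pairwise_lt _ (by
      have hp := PySem.List.sorted_pairwise xs (fun kv => kv.2)
      exact (List.pairwise_map).2 (List.Pairwise.sublist List.filter_sublist hp))

theorem by_age_eq_canon (xs : List (String × Int)) (lo hi : Int) :
    by_age xs lo hi = pvCanon lo hi xs := by
  rw [by_age_eq_grp]
  unfold pvGrp pvCanon
  rw [pv_keyset]
  apply List.map_congr_left
  intro v _
  rw [pvNames_sorted]

-- B's grouping loop builds the grouping of the original order
theorem by_age_alt_groups (xs : List (String × Int)) (lo hi : Int) :
    (xs.foldl (fun g kv =>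
        if lo ≤ kv.2 ∧ kv.2 ≤ hi then g.modify kv.2 [] (fun l => l ++ [kv.1]) else g)
        (PySem.Dict.empty : PySem.Dict Int (List String))).items
      = pvGrp (fun ns => ns) lo hi xs := by
  have hstep : (fun (g : PySem.Dict Int (List String)) (kv : String × Int) =>
      if lo ≤ kv.2 ∧ kv.2 ≤ hi then g.modify kv.2 [] (fun l => l ++ [kv.1]) else g)
      = (fun (g : PySem.Dict Int (List String)) (kv : String × Int) => if lo ≤ kv.2 ∧ kv.2 ≤ hi then
          (if g.contains kv.2 then g.insert kv.2 ((g.getD kv.2 []) ++ [kv.1])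
           else g.insert kv.2 [kv.1]) else g) := by
    funext g kv
    by_cases h : lo ≤ kv.2 ∧ kv.2 ≤ hi
    · rw [if_pos h, if_pos h]
      unfold PySem.Dict.modify
      by_cases hc : g.contains kv.2
      · rw [if_pos hc]
      · rw [if_neg hc, pv_getD_not_contains g kv.2 [] (by simpa using hc)]
        rfl
    · rw [if_neg h, if_neg h]
  rw [hstep]
  exact pv_fold_group lo hi (fun l k => l ++ [k]) (fun k => [k]) [] (fun ns => ns)
    (fun k => rfl) (fun ns k _ => rfl) xs

-- inserting distinct fresh keys into an empty dict lists them in order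
theorem pv_fold_insert (f : Int → String) (ks : List Int) (h : ks.Nodup) :
    ((ks.foldl (fun res v => res.insert v (f v)) PySem.Dict.empty).items)
      = ks.map (fun v => (v, f v)) := by
  induction ks using List.reverseRecOn with
  | nil => rfl
  | append_singleton ks k ih =>
    have h1 : ks.Nodup := h.of_append_left
    have hk : k ∉ ks := fun hm =>
      (List.disjoint_of_nodup_append h) hm List.mem_cons_self
    rw [List.foldl_append, List.foldl_cons, List.foldl_nil]
    set d := ks.foldl (fun res v => res.insert v (f v)) PySem.Dict.empty with hd
    have hitems : d.items = ks.map (fun v => (v, f v)) := ih h1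
    have hc : d.contains k = false := by
      rw [pv_contains_map d ks _ k hitems]; simpa using hk
    show (PySem.Dict.insert d k _).items = _
    unfold PySem.Dict.insert
    rw [hc, if_neg (by simp), hitems, List.map_append, List.map_cons, List.map_nil]

theorem by_age_alt_eq_canon (xs : List (String × Int)) (lo hi : Int) :
    by_age_alt xs lo hi = pvCanon lo hi xs := by
  unfold by_age_alt
  set groups := xs.foldl (fun g kv =>
      if lo ≤ kv.2 ∧ kv.2 ≤ hi then g.modify kv.2 [] (fun l => l ++ [kv.1]) else g)
      (PySem.Dict.empty : PySem.Dict Int (List String)) with hg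
  have hitems : groups.items
      = (PySem.Set.ofList ((xs.filter (pvKeep lo hi)).map Prod.snd)).map
          (fun v => (v, pvNames v (xs.filter (pvKeep lo hi)))) :=
    by_age_alt_groups xs lo hi
  have hkeys : groups.keys = PySem.Set.ofList ((xs.filter (pvKeep lo hi)).map Prod.snd) := by
    unfold PySem.Dict.keys
    rw [hitems, List.map_map]
    exact List.map_id _
  have hnodup : (PySem.List.sorted groups.keys (fun v => v)).Nodup := by
    rw [hkeys]
    exact ((PySem.List.sorted_perm _ _ _).nodup_iff).2 (PySem.Set.nodup_ofList _)
  rw [pv_fold_insert _ _ hnodup]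
  unfold pvCanon
  rw [hkeys]
  apply List.map_congr_left
  intro v hv
  have hmem : v ∈ PySem.Set.ofList ((xs.filter (pvKeep lo hi)).map Prod.snd) := by
    rw [← PySem.List.mem_sorted _ (fun v => v) false]
    exact hv
  have : groups.getD v [] = pvNames v (xs.filter (pvKeep lo hi)) := by
    unfold PySem.Dict.getD
    rw [pv_get?_map groups _ _ v hitems hmem]; rfl
  rw [this]

-- ===== VERDICT (by name: the statement is the Claim_ definition above) =====
theorem by_age_spec : Claim_equal_by_age := by
  intro dict_in min_age max_age _
  unfold Spec_by_age
  rw [by_age_eq_canon, by_age_alt_eq_canon]
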